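-- pv_equiv track=rewrite | github.com/netra-systems/zen | fix_central_logger_imports.py | get_import_location
-- ===== SOURCE A (Python) =====
-- def get_import_location(content: str) -> int:
--     """Find the best location to insert the import."""
--     lines = content.split('\n')
--
--     # Look for existing imports
--     last_import_line = -1
--     for i, line in enumerate(lines):
--         if (line.strip().startswith('import ') or
--             line.strip().startswith('from ') or
--             line.strip().startswith('#') or
--             line.strip().startswith('"""') or
--             line.strip().startswith("'''") or
--             line.strip() == ''):
--             if line.strip().startswith('import ') or line.strip().startswith('from '):
--                 last_import_line = i
--             continue
--         else:
--             break
--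
--     # If no imports found, add after docstring/comments
--     if last_import_line == -1:
--         for i, line in enumerate(lines):
--             if (line.strip().startswith('#') or
--                 line.strip().startswith('"""') or
--                 line.strip().startswith("'''") or
--                 line.strip() == ''):
--                 continue
--             else:
--                 return i
--         return 0
--
--     return last_import_line + 1
-- ===== SOURCE B (Python) =====
-- def get_import_location(content: str) -> int:
--     """Find the best location to insert the import."""
--     lines = content.split('\n')
--     # Header prefix: the leading run of (stripped) import/comment/docstring/blank lines.
--     prefix = []
--     for line in lines:
--         s = line.strip()
--         if s.startswith(('import ', 'from ', '#', '"""', "'''")) or s == '':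
--             prefix.append(s)
--         else:
--             break
--     # Insert right after the last import line of the header, if any.
--     for j, s in reversed(list(enumerate(prefix))):
--         if s.startswith(('import ', 'from ')):
--             return j + 1
--     # No imports: insert at the first code line, or 0 if the file is all header.
--     return len(prefix) if len(prefix) < len(lines) else 0
-- ===== Notes on version B (the rewrite author's own statement) =====
-- stated objective: alternative
-- what changed: A's two sentinel-tracking index loops (break-scan keeping last_import_line, then a second full rescan when it stayed -1) are replaced by building the stripped header prefix once (takewhile), reverse-scanning it for the last import, and computing the no-import fallback in closed form from the prefix length.
import Mathlib
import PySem

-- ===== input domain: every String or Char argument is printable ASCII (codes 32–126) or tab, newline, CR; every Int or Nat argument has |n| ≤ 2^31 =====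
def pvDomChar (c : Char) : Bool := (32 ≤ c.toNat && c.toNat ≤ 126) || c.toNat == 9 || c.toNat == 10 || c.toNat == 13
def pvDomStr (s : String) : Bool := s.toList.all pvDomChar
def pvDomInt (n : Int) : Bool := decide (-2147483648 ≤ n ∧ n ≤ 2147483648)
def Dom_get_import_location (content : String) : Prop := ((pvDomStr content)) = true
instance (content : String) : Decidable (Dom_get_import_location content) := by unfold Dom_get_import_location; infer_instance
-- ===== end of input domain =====

-- B replaces A's two sentinel-tracking index loops by a single header-prefix pass, a reverse
-- scan for the last import, and a closed-form fallback from the prefix length (alternative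
-- decomposition; same cost).

-- ===== PORT A =====
def pvImpA (s : String) : Bool :=
  PySem.Str.startswith s "import " || PySem.Str.startswith s "from "

def pvSkipA (s : String) : Bool :=
  PySem.Str.startswith s "#" || PySem.Str.startswith s "\"\"\"" ||
  PySem.Str.startswith s "'''" || s == ""

-- first loop of A: break at the first non-header line, tracking last_import_line
def pvLoop1 : List String → Int → Int → Int
  | [], _, last => last
  | line :: rest, i, last =>
    let s := PySem.Str.strip line
    if pvImpA s || pvSkipA s then
      pvLoop1 rest (i + 1) (if pvImpA s then i else last)
    else last

-- second loop of A: first non-(comment/docstring/blank) line, else 0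
def pvLoop2 : List String → Int → Int
  | [], _ => 0
  | line :: rest, i =>
    let s := PySem.Str.strip line
    if pvSkipA s then pvLoop2 rest (i + 1) else i

def get_import_location (content : String) : Int :=
  let lines := (PySem.Str.split? content "
").getD []
  let last := pvLoop1 lines 0 (-1)
  if last == -1 then pvLoop2 lines 0 else last + 1

-- ===== PORT B =====
def pvImpB (s : String) : Bool :=
  PySem.Str.startswith s "import " || PySem.Str.startswith s "from "

def pvHdrB (s : String) : Bool :=
  (PySem.Str.startswith s "import " || PySem.Str.startswith s "from " ||
   PySem.Str.startswith s "#" || PySem.Str.startswith s "\"\"\"" ||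
   PySem.Str.startswith s "'''") || s == ""

-- Source B's first loop: the stripped header prefix (append while header, break otherwise)
def pvPrefixB : List String → List String
  | [] => []
  | line :: rest =>
    let s := PySem.Str.strip line
    if pvHdrB s then s :: pvPrefixB rest else []

-- Source B's second loop: first import in reversed(list(enumerate(prefix)))
def pvFindLastImp : List (Int × String) → Option Int
  | [] => none
  | (j, s) :: rest => if pvImpB s then some j else pvFindLastImp rest

def get_import_location_alt (content : String) : Int :=
  let lines := (PySem.Str.split? content "
").getD []
  let pre := pvPrefixB lines
  match pvFindLastImp (PySem.List.enumerate pre 0).reverse with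
  | some j => j + 1
  | none => if pre.length < lines.length then (pre.length : Int) else 0

-- ===== PRECONDITION & SPEC =====
def Spec_get_import_location (content : String) (out : Int) : Prop := out = get_import_location_alt content
instance (content : String) (out : Int) : Decidable (Spec_get_import_location content out) := by unfold Spec_get_import_location; infer_instance

-- ===== CLAIM (what is proved, stated in full; the proofs are below) =====
def Claim_equal_get_import_location : Prop := ∀ (content : String), Dom_get_import_location content → Spec_get_import_location content (get_import_location content)

-- ===== LEMMAS AND PROOFS =====

-- index (as Int) of the last import line inside the leading header-line run
def lastImpSpec : List String → Option Int
  | [] => none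
  | line :: rest =>
    let s := PySem.Str.strip line
    if pvImpA s || pvSkipA s then
      match lastImpSpec rest with
      | some k => some (k + 1)
      | none => if pvImpA s then some 0 else none
    else none

-- index (as Int) of the first non-(comment/docstring/blank) line
def firstCodeSpec : List String → Option Int
  | [] => none
  | line :: rest =>
    let s := PySem.Str.strip line
    if pvSkipA s then (firstCodeSpec rest).map (· + 1) else some 0

theorem lastImpSpec_nonneg : ∀ (ls : List String) (k : Int), lastImpSpec ls = some k → 0 ≤ k := by
  intro ls
  induction ls with
  | nil => intro k h; simp [lastImpSpec] at h
  | cons line rest ih =>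
    intro k h
    simp only [lastImpSpec] at h
    split at h
    · cases hrest : lastImpSpec rest with
      | some k' => rw [hrest] at h; have := ih k' hrest; simp at h; omega
      | none => rw [hrest] at h; split at h <;> simp_all
    · simp at h

theorem loop1_eq : ∀ (ls : List String) (i last : Int),
    pvLoop1 ls i last = (lastImpSpec ls).elim last (fun k => i + k) := by
  intro ls
  induction ls with
  | nil => intro i last; simp [pvLoop1, lastImpSpec]
  | cons line rest ih =>
    intro i last
    simp only [pvLoop1, lastImpSpec]
    split
    · rw [ih]
      cases hrest : lastImpSpec rest with
      | some k => simp [Option.elim]; omega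
      | none => split <;> simp [Option.elim]
    · rfl

theorem loop2_eq : ∀ (ls : List String) (i : Int),
    pvLoop2 ls i = (firstCodeSpec ls).elim 0 (fun k => i + k) := by
  intro ls
  induction ls with
  | nil => intro i; simp [pvLoop2, firstCodeSpec]
  | cons line rest ih =>
    intro i
    simp only [pvLoop2, firstCodeSpec]
    split
    · rw [ih]
      cases hrest : firstCodeSpec rest with
      | some k => simp [Option.elim]; omega
      | none => simp [Option.elim]
    · simp

theorem findLastImp_append : ∀ (xs ys : List (Int × String)),
    pvFindLastImp (xs ++ ys) = (pvFindLastImp xs).or (pvFindLastImp ys) := by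
  intro xs ys
  induction xs with
  | nil => simp [pvFindLastImp]
  | cons p rest ih =>
    obtain ⟨j, s⟩ := p
    simp only [List.cons_append, pvFindLastImp]
    split <;> simp [ih]

theorem hdrB_eq (s : String) : pvHdrB s = (pvImpA s || pvSkipA s) := by
  simp [pvHdrB, pvImpA, pvSkipA, Bool.or_assoc]

theorem prefix_enum_eq : ∀ (ls : List String) (n : Int),
    pvFindLastImp (PySem.List.enumerate (pvPrefixB ls) n).reverse =
      (lastImpSpec ls).map (fun k => n + k) := by
  intro ls
  induction ls with
  | nil => intro n; simp [pvPrefixB, lastImpSpec, pvFindLastImp]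
  | cons line rest ih =>
    intro n
    simp only [pvPrefixB, lastImpSpec, hdrB_eq]
    split
    · rw [PySem.List.enumerate_cons, List.reverse_cons, findLastImp_append, ih]
      cases hrest : lastImpSpec rest with
      | some k => simp [Option.or]; omega
      | none =>
        have himp : pvImpB (PySem.Str.strip line) = pvImpA (PySem.Str.strip line) := rfl
        simp only [Option.map_none, Option.none_or, pvFindLastImp, himp]
        split <;> simp
    · simp [pvFindLastImp]

theorem fallback_eq : ∀ (ls : List String), lastImpSpec ls = none →
    firstCodeSpec ls =
      (if (pvPrefixB ls).length < ls.length then some ((pvPrefixB ls).length : Int) else none) := by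
  intro ls
  induction ls with
  | nil => intro _; simp [firstCodeSpec, pvPrefixB]
  | cons line rest ih =>
    intro h
    simp only [lastImpSpec] at h
    simp only [firstCodeSpec, pvPrefixB, hdrB_eq]
    by_cases hh : (pvImpA (PySem.Str.strip line) || pvSkipA (PySem.Str.strip line)) = true
    · rw [if_pos hh] at h ⊢
      have hrest : lastImpSpec rest = none := by
        cases hrest : lastImpSpec rest with
        | some k => rw [hrest] at h; simp at h
        | none => rfl
      rw [hrest] at h
      have himp : pvImpA (PySem.Str.strip line) = false := by
        by_contra hc
        simp only [Bool.not_eq_false] at hc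
        rw [if_pos hc] at h; simp at h
      have hskip : pvSkipA (PySem.Str.strip line) = true := by
        rw [himp] at hh; simpa using hh
      rw [hskip, if_pos rfl, ih hrest]
      by_cases hlt : (pvPrefixB rest).length < rest.length
      · rw [if_pos hlt, if_pos (by simpa using hlt)]
        simp
      · rw [if_neg hlt, if_neg (by simpa using hlt)]
        simp
    · rw [if_neg hh]
      have hskip : pvSkipA (PySem.Str.strip line) = false := by
        cases hs : pvSkipA (PySem.Str.strip line)
        · rfl
        · exact absurd (by simp [hs]) hh
      rw [hskip]
      simp

-- ===== VERDICT (by name: the statement is the Claim_ definition above) =====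
theorem get_import_location_spec : Claim_equal_get_import_location := by
  unfold Claim_equal_get_import_location
  intro content _
  unfold Spec_get_import_location get_import_location get_import_location_alt
  dsimp only
  rw [loop1_eq, prefix_enum_eq]
  cases hspec : lastImpSpec ((PySem.Str.split? content "\n").getD []) with
  | some k =>
    have hk := lastImpSpec_nonneg _ _ hspec
    simp only [Option.elim, Option.map_some]
    rw [if_neg (by simp; omega)]
  | none =>
    simp only [Option.elim, Option.map_none]
    rw [if_pos (by simp), loop2_eq, fallback_eq _ hspec]
    split <;> simp [Option.elim]
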